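-- pv_equiv track=rewrite | github.com/gogit2194/NOVIX2026 | backend/app/services/working_memory_service.py | _select_focus_facts
-- ===== SOURCE A (Python) =====
-- from typing import Any, Dict, List, Optional
--
-- def _focus_score_text(text: str, focus_terms: List[str]) -> int:
--     if not (text and focus_terms):
--         return 0
--     return _term_overlap(text, focus_terms)
--
-- def _select_focus_facts(facts: List[Any], focus_terms: List[str], limit: int = 12) -> List[str]:
--     raw = [str(item).strip() for item in (facts or []) if str(item).strip()]
--     if not raw:
--         return []
--     limit = max(int(limit or 0), 0)
--     if limit <= 0:
--         return []
--
--     if not focus_terms: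
--         return raw[:limit]
--
--     scored: List[tuple[int, str]] = []
--     for fact in raw:
--         scored.append((_focus_score_text(fact, focus_terms), fact))
--     scored.sort(key=lambda x: (x[0], len(x[1])), reverse=True)
--
--     focused = [fact for score, fact in scored if score > 0]
--     if focused:
--         return focused[:limit]
--
--     # If nothing overlaps, keep a small prefix instead of dumping everything.
--     return raw[: min(limit, 5)]
--
-- def _term_overlap(text: str, terms: List[str]) -> int:
--     count = 0
--     for term in terms:
--         if term and term in text:
--             count += 1
--     return count
-- ===== SOURCE B (Python) =====
-- def _score(fact, focus_terms):
--     return sum(1 for t in focus_terms if t and t in fact)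
--
--
-- def _select_focus_facts(facts, focus_terms, limit=12):
--     raw = []
--     for item in (facts or []):
--         text = str(item).strip()
--         if text:
--             raw.append(text)
--     n = max(int(limit or 0), 0)
--     if not raw or n == 0:
--         return []
--     if not focus_terms:
--         return raw[:n]
--     pairs = [(_score(f, focus_terms), f) for f in raw]
--     # tier sweep: possible scores from len(focus_terms) down to 1, each tier
--     # stably sorted by length descending
--     focused = []
--     s = len(focus_terms)
--     while s > 0:
--         focused += sorted([f for sc, f in pairs if sc == s], key=len, reverse=True)
--         s -= 1
--     if focused:
--         return focused[:n]
--     return raw[:min(n, 5)]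
-- ===== Notes on version B (the rewrite author's own statement) =====
-- stated objective: alternative
-- what changed: Replaces A's single global stable sort of (score, fact) pairs by (score, len) with a tier sweep: scores are computed once, then a countdown loop over the possible overlap scores len(focus_terms)..1 collects each tier and stably sorts it by length descending; raw is built by an accumulator loop and the empty/limit guards are merged into one early return.
import Mathlib
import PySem

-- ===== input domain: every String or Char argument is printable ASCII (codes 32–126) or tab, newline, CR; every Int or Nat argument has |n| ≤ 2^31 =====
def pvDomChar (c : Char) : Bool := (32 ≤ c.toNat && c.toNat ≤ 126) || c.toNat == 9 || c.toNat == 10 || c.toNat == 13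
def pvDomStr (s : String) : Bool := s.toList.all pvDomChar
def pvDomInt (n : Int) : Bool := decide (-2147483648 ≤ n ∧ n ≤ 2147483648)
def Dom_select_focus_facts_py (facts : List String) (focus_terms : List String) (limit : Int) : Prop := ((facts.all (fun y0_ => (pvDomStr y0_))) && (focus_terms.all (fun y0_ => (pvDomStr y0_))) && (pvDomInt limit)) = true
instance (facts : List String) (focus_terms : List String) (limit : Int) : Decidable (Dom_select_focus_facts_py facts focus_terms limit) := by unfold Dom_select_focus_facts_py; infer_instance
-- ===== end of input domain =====

-- B replaces A's single global stable sort by (score, len) with a countdown tier sweep over the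
-- possible scores len(focus_terms) down to 1, each tier stably sorted by length descending
-- (alternative decomposition, similar cost).

-- ===== PORT A =====
def term_overlap_py (text : String) (terms : List String) : Int :=
  terms.foldl (fun count term =>
    if term ≠ "" ∧ PySem.Str.isIn term text then count + 1 else count) 0

def focus_score_text_py (text : String) (focus_terms : List String) : Int :=
  if text = "" ∨ focus_terms = [] then 0
  else term_overlap_py text focus_terms

def select_focus_facts_py (facts : List String) (focus_terms : List String) (limit : Int) : List String :=
  let raw := (facts.map (fun item => PySem.Str.strip item)).filter (fun s => !(s == ""))
  if raw = [] then []
  else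
    let lim := max limit 0
    if lim ≤ 0 then []
    else
      if focus_terms = [] then PySem.List.slice raw none (some lim)
      else
        let scored := raw.foldl
          (fun acc fact => acc ++ [(focus_score_text_py fact focus_terms, fact)])
          ([] : List (Int × String))
        let scoredSorted := PySem.List.sorted2 scored (fun x => x.1) (fun x => PySem.Str.len x.2) true
        let focused := (scoredSorted.filter (fun p => decide (0 < p.1))).map (fun p => p.2)
        if focused ≠ [] then PySem.List.slice focused none (some lim)
        else PySem.List.slice raw none (some (min lim 5))

-- ===== PORT B =====
def score_py_alt (fact : String) (terms : List String) : Int :=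
  ((terms.countP (fun t => !(t == "") && PySem.Str.isIn t fact) : Nat) : Int)

def tiers_py_alt (pairs : List (Int × String)) : Nat → List String → List String
  | 0, focused => focused
  | Nat.succ m, focused =>
      tiers_py_alt pairs m
        (focused ++ PySem.List.sorted
          ((pairs.filter (fun p => p.1 == ((m : Int) + 1))).map (fun p => p.2))
          (fun f => PySem.Str.len f) true)

def select_focus_facts_py_alt (facts : List String) (focus_terms : List String) (limit : Int) : List String :=
  let raw := facts.foldl
    (fun acc item =>
      let text := PySem.Str.strip item
      if text == "" then acc else acc ++ [text]) []
  let n := max limit 0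
  if raw = [] ∨ n = 0 then []
  else if focus_terms = [] then PySem.List.slice raw none (some n)
  else
    let pairs := raw.map (fun f => (score_py_alt f focus_terms, f))
    let focused := tiers_py_alt pairs focus_terms.length []
    if focused ≠ [] then PySem.List.slice focused none (some n)
    else PySem.List.slice raw none (some (min n 5))

-- ===== PRECONDITION & SPEC =====
def Spec_select_focus_facts_py (facts : List String) (focus_terms : List String) (limit : Int) (out : List String) : Prop := out = select_focus_facts_py_alt facts focus_terms limit
instance (facts : List String) (focus_terms : List String) (limit : Int) (out : List String) : Decidable (Spec_select_focus_facts_py facts focus_terms limit out) := by unfold Spec_select_focus_facts_py; infer_instance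

-- ===== CLAIM (what is proved, stated in full; the proofs are below) =====
def Claim_equal_select_focus_facts_py : Prop := ∀ (facts : List String) (focus_terms : List String) (limit : Int), Dom_select_focus_facts_py facts focus_terms limit → Spec_select_focus_facts_py facts focus_terms limit (select_focus_facts_py facts focus_terms limit)

-- ===== LEMMAS AND PROOFS =====

-- tagging a list with ascending indices (proof-side device for stability)
def pvTag {α : Type} : Nat → List α → List (Nat × α)
  | _, [] => []
  | n, x :: xs => (n, x) :: pvTag (n + 1) xs

-- the strict "before" comparison of A's reverse (score, len) sort, on pairs
def pvBA (p q : Int × String) : Bool :=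
  decide (q.1 < p.1) || (!decide (p.1 < q.1) && decide (PySem.Str.len q.2 < PySem.Str.len p.2))

-- total strict order on tagged pairs: (score desc, len desc, index asc)
def pvRb (x y : Nat × (Int × String)) : Bool :=
  pvBA x.2 y.2 || (!pvBA x.2 y.2 && !pvBA y.2 x.2 && decide (x.1 < y.1))

def pvSrt {β : Type} (b : β → β → Bool) (xs : List β) : List β :=
  xs.foldl (fun acc x => PySem.List.insertBy b x acc) []

-- the descending list [k, k-1, …, 1] of candidate scores (proof-side image of B's recursion)
def pvDesc : Nat → List Int
  | 0 => []
  | Nat.succ m => ((m : Int) + 1) :: pvDesc m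

theorem pvBA_iff (p q : Int × String) :
    pvBA p q = true ↔ (q.1 < p.1 ∨ (p.1 = q.1 ∧ PySem.Str.len q.2 < PySem.Str.len p.2)) := by
  simp [pvBA]
  omega

theorem pvBA_false_iff (p q : Int × String) :
    pvBA p q = false ↔ ¬ (q.1 < p.1 ∨ (p.1 = q.1 ∧ PySem.Str.len q.2 < PySem.Str.len p.2)) := by
  rw [← Bool.not_eq_true, pvBA_iff]

theorem pvRb_iff (x y : Nat × (Int × String)) :
    pvRb x y = true ↔
      (y.2.1 < x.2.1 ∨ (x.2.1 = y.2.1 ∧ (PySem.Str.len y.2.2 < PySem.Str.len x.2.2 ∨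
        (PySem.Str.len x.2.2 = PySem.Str.len y.2.2 ∧ x.1 < y.1)))) := by
  simp [pvRb, pvBA_iff, pvBA_false_iff]
  omega

theorem pvRb_asym (x y : Nat × (Int × String)) (h : pvRb x y = true) : pvRb y x = false := by
  rw [← Bool.not_eq_true]
  rw [pvRb_iff] at h ⊢
  omega

theorem pvRb_trans (x y z : Nat × (Int × String)) (h1 : pvRb x y = true) (h2 : pvRb y z = true) :
    pvRb x z = true := by
  rw [pvRb_iff] at h1 h2 ⊢
  omega

theorem pvRb_total_ne (x y : Nat × (Int × String)) (h : x.1 ≠ y.1) :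
    pvRb x y = true ∨ pvRb y x = true := by
  rw [pvRb_iff, pvRb_iff]
  omega

theorem pvRb_eq_bA (p q : Nat × (Int × String)) (h : q.1 < p.1) :
    pvRb p q = pvBA p.2 q.2 := by
  have : decide (p.1 < q.1) = false := by simp; omega
  simp [pvRb, this]

theorem pvInsertBy_nil {α : Type} (b : α → α → Bool) (x : α) :
    PySem.List.insertBy b x [] = [x] := rfl

theorem pvInsertBy_cons {α : Type} (b : α → α → Bool) (x y : α) (ys : List α) :
    PySem.List.insertBy b x (y :: ys) =
      if b x y then x :: y :: ys else y :: PySem.List.insertBy b x ys := rfl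

theorem pvInsertBy_map {α β : Type} (g : α → β) (bb : β → β → Bool) (x : α) (l : List α) :
    (PySem.List.insertBy (fun a c => bb (g a) (g c)) x l).map g
      = PySem.List.insertBy bb (g x) (l.map g) := by
  induction l with
  | nil => rfl
  | cons y ys ih =>
    simp only [pvInsertBy_cons, List.map_cons]
    by_cases h : bb (g x) (g y)
    · simp [h]
    · simp [h, ih]

theorem pvFoldl_insertBy_map {α β : Type} (g : α → β) (bb : β → β → Bool) (xs : List α) :
    ∀ acc : List α,
      ((xs.foldl (fun a x => PySem.List.insertBy (fun p q => bb (g p) (g q)) x a) acc).map g)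
        = (xs.map g).foldl (fun a x => PySem.List.insertBy bb x a) (acc.map g) := by
  induction xs with
  | nil => intro acc; rfl
  | cons x xs ih =>
    intro acc
    simp only [List.foldl_cons, List.map_cons]
    rw [ih, pvInsertBy_map]

theorem pvInsertBy_perm {α : Type} (b : α → α → Bool) (x : α) (l : List α) :
    (PySem.List.insertBy b x l).Perm (x :: l) := by
  induction l with
  | nil => exact List.Perm.refl _
  | cons y ys ih =>
    rw [pvInsertBy_cons]
    by_cases h : b x y
    · simp [h]
    · simp only [h]
      exact ((ih.cons y).trans (List.Perm.swap x y ys)).trans (List.Perm.refl _)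

theorem pvFoldl_insertBy_perm {α : Type} (b : α → α → Bool) (xs : List α) :
    ∀ acc : List α,
      (xs.foldl (fun a x => PySem.List.insertBy b x a) acc).Perm (xs ++ acc) := by
  induction xs with
  | nil => intro acc; simp
  | cons x xs ih =>
    intro acc
    simp only [List.foldl_cons, List.cons_append]
    exact (ih _).trans ((List.Perm.append_left xs (pvInsertBy_perm b x acc)).trans List.perm_middle)

theorem pvSrt_perm {α : Type} (b : α → α → Bool) (xs : List α) : (pvSrt b xs).Perm xs := by
  have := pvFoldl_insertBy_perm b xs []
  simpa [pvSrt] using this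

theorem pvInsertBy_pairwise {α : Type} (b : α → α → Bool)
    (hasym : ∀ x y, b x y = true → b y x = false)
    (htrans : ∀ x y z, b x y = true → b y z = true → b x z = true)
    (x : α) (l : List α) (hl : l.Pairwise (fun a c => b c a = false)) :
    (PySem.List.insertBy b x l).Pairwise (fun a c => b c a = false) := by
  induction l with
  | nil => simp [pvInsertBy_nil]
  | cons y ys ih =>
    rw [pvInsertBy_cons]
    rcases List.pairwise_cons.mp hl with ⟨hy, hys⟩
    by_cases h : b x y
    · simp only [h, if_pos]
      refine List.pairwise_cons.mpr ⟨?_, hl⟩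
      intro z hz
      rcases List.mem_cons.mp hz with rfl | hz
      · exact hasym _ _ h
      · by_contra hzx
        have hzx' : b z x = true := by
          cases hb : b z x
          · exact absurd hb hzx
          · rfl
        have : b z y = true := htrans _ _ _ hzx' h
        rw [hy z hz] at this
        exact Bool.false_ne_true this
    · simp only [h, if_neg, Bool.false_eq_true, not_false_iff]
      refine List.pairwise_cons.mpr ⟨?_, ih hys⟩
      intro w hw
      rcases (PySem.List.mem_insertBy b x w ys).mp hw with rfl | hw
      · exact Bool.not_eq_true _ |>.mp h
      · exact hy w hw

theorem pvSrt_pairwise {α : Type} (b : α → α → Bool)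
    (hasym : ∀ x y, b x y = true → b y x = false)
    (htrans : ∀ x y z, b x y = true → b y z = true → b x z = true)
    (xs : List α) : (pvSrt b xs).Pairwise (fun a c => b c a = false) := by
  suffices h : ∀ acc : List α, acc.Pairwise (fun a c => b c a = false) →
      (xs.foldl (fun a x => PySem.List.insertBy b x a) acc).Pairwise (fun a c => b c a = false) by
    exact h [] (List.Pairwise.nil)
  induction xs with
  | nil => intro acc hacc; exact hacc
  | cons x xs ih =>
    intro acc hacc
    exact ih _ (pvInsertBy_pairwise b hasym htrans x acc hacc)

theorem pvInsertBy_congr {α : Type} (b b' : α → α → Bool) (x : α) :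
    ∀ l : List α, (∀ y ∈ l, b x y = b' x y) → PySem.List.insertBy b x l = PySem.List.insertBy b' x l := by
  intro l
  induction l with
  | nil => intro _; rfl
  | cons y ys ih =>
    intro h
    rw [pvInsertBy_cons, pvInsertBy_cons, h y (List.mem_cons_self ..)]
    by_cases hb : b' x y
    · simp [hb]
    · simp only [hb, if_neg, Bool.false_eq_true, not_false_iff]
      rw [ih (fun z hz => h z (List.mem_cons_of_mem _ hz))]

theorem pvFoldl_insertBy_congr_idx {α : Type} (b b' : Nat × α → Nat × α → Bool) :
    ∀ (xs acc : List (Nat × α)),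
      xs.Pairwise (fun p q => p.1 < q.1) →
      (∀ q ∈ acc, ∀ p ∈ xs, q.1 < p.1) →
      (∀ p q, (p ∈ xs ∨ p ∈ acc) → (q ∈ xs ∨ q ∈ acc) → q.1 < p.1 → b p q = b' p q) →
      xs.foldl (fun a x => PySem.List.insertBy b x a) acc
        = xs.foldl (fun a x => PySem.List.insertBy b' x a) acc := by
  intro xs
  induction xs with
  | nil => intro acc _ _ _; rfl
  | cons x xs ih =>
    intro acc hpw hacc hb
    rcases List.pairwise_cons.mp hpw with ⟨hx, hxs⟩
    have hins : PySem.List.insertBy b x acc = PySem.List.insertBy b' x acc := by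
      refine pvInsertBy_congr b b' x acc ?_
      intro y hy
      exact hb x y (Or.inl (List.mem_cons_self ..)) (Or.inr hy)
        (hacc y hy x (List.mem_cons_self ..))
    simp only [List.foldl_cons]
    rw [hins]
    refine ih (PySem.List.insertBy b' x acc) hxs ?_ ?_
    · intro q hq p hp
      rcases (PySem.List.mem_insertBy b' x q acc).mp hq with rfl | hq
      · exact hx p hp
      · exact hacc q hq p (List.mem_cons_of_mem _ hp)
    · intro p q hp hq hlt
      refine hb p q ?_ ?_ hlt
      · rcases hp with hp | hp
        · exact Or.inl (List.mem_cons_of_mem _ hp)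
        · rcases (PySem.List.mem_insertBy b' x p acc).mp hp with rfl | hp
          · exact Or.inl (List.mem_cons_self ..)
          · exact Or.inr hp
      · rcases hq with hq | hq
        · exact Or.inl (List.mem_cons_of_mem _ hq)
        · rcases (PySem.List.mem_insertBy b' x q acc).mp hq with rfl | hq
          · exact Or.inl (List.mem_cons_self ..)
          · exact Or.inr hq

theorem pvEq_of_perm_of_pairwise {α : Type} (b : α → α → Bool)
    (hasym : ∀ x y, b x y = true → b y x = false) :
    ∀ l1 l2 : List α, l1.Perm l2 → l1.Pairwise (fun a c => b a c = true) →
      l2.Pairwise (fun a c => b a c = true) → l1 = l2 := by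
  intro l1
  induction l1 with
  | nil => intro l2 h _ _; exact (h.nil_eq).symm ▸ rfl
  | cons x t1 ih =>
    intro l2 h h1 h2
    cases l2 with
    | nil => exact absurd h.symm.nil_eq (by simp)
    | cons y t2 =>
      rcases List.pairwise_cons.mp h1 with ⟨hx1, ht1⟩
      rcases List.pairwise_cons.mp h2 with ⟨hy2, ht2⟩
      by_cases hxy : x = y
      · subst hxy
        have := ih t2 (h.cons_inv) ht1 ht2
        rw [this]
      · exfalso
        have hxl2 : x ∈ y :: t2 := h.mem_iff.mp (List.mem_cons_self ..)
        have hyl1 : y ∈ x :: t1 := h.symm.mem_iff.mp (List.mem_cons_self ..)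
        have hx2 : x ∈ t2 := by
          rcases List.mem_cons.mp hxl2 with rfl | hh
          · exact absurd rfl hxy
          · exact hh
        have hy1 : y ∈ t1 := by
          rcases List.mem_cons.mp hyl1 with rfl | hh
          · exact absurd rfl (fun h' => hxy h'.symm)
          · exact hh
        have h1' : b x y = true := hx1 y hy1
        have h2' : b y x = true := hy2 x hx2
        rw [hasym _ _ h1'] at h2'
        exact Bool.false_ne_true h2'

theorem pvTag_map_snd {α : Type} (L : List α) : ∀ n, (pvTag n L).map Prod.snd = L := by
  induction L with
  | nil => intro n; rfl
  | cons x xs ih => intro n; simp [pvTag, ih]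

theorem pvTag_mem_ge {α : Type} (L : List α) : ∀ n, ∀ p ∈ pvTag n L, n ≤ p.1 := by
  induction L with
  | nil => intro n p hp; simp [pvTag] at hp
  | cons x xs ih =>
    intro n p hp
    rcases List.mem_cons.mp hp with rfl | hp
    · exact le_refl _
    · exact Nat.le_of_succ_le (ih (n + 1) p hp)

theorem pvTag_pairwise {α : Type} (L : List α) : ∀ n, (pvTag n L).Pairwise (fun p q => p.1 < q.1) := by
  induction L with
  | nil => intro n; exact List.Pairwise.nil
  | cons x xs ih =>
    intro n
    refine List.pairwise_cons.mpr ⟨?_, ih (n + 1)⟩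
    intro q hq
    exact Nat.lt_of_lt_of_le (Nat.lt_succ_self n) (pvTag_mem_ge xs (n + 1) q hq)

theorem pvTag_mem_snd {α : Type} (L : List α) : ∀ n, ∀ p ∈ pvTag n L, p.2 ∈ L := by
  intro n p hp
  have := pvTag_map_snd L n
  rw [← this]
  exact List.mem_map_of_mem hp

-- the sorted result of a fst-distinct tagged list is strictly pairwise pvRb
theorem pvSrt_pairwise_Rb (xs : List (Nat × (Int × String)))
    (hpw : xs.Pairwise (fun p q => p.1 < q.1)) :
    (pvSrt pvRb xs).Pairwise (fun a c => pvRb a c = true) := by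
  have P1 := pvSrt_pairwise pvRb pvRb_asym pvRb_trans xs
  have hnd : ((pvSrt pvRb xs).map Prod.fst).Nodup := by
    have hperm : ((pvSrt pvRb xs).map Prod.fst).Perm (xs.map Prod.fst) :=
      (pvSrt_perm pvRb xs).map Prod.fst
    have : (xs.map Prod.fst).Nodup := by
      rw [List.Nodup, List.pairwise_map]
      exact hpw.imp (fun h => Nat.ne_of_lt h)
    exact (hperm.nodup_iff).mpr this
  have P2 : (pvSrt pvRb xs).Pairwise (fun a c => a.1 ≠ c.1) := by
    rw [List.Nodup, List.pairwise_map] at hnd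
    exact hnd
  have P12 := List.pairwise_and_iff.mpr ⟨P1, P2⟩
  refine P12.imp ?_
  rintro a c ⟨h1, h2⟩
  rcases pvRb_total_ne a c h2 with h | h
  · exact h
  · rw [h1] at h; exact absurd h (by simp)

theorem pv_count_filter {β : Type} [DecidableEq β] (p : β → Bool) (T : List β) (z : β) :
    List.count z (T.filter p) = if p z then List.count z T else 0 := by
  by_cases h : p z
  · rw [if_pos h, List.count_filter h]
  · rw [if_neg h]
    refine List.count_eq_zero.mpr ?_
    intro hz
    exact h (List.of_mem_filter hz)

theorem pv_flatMap_count {β : Type} [DecidableEq β] (T : List β) (f : β → Int) :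
    ∀ scores : List Int, scores.Nodup → ∀ z : β,
      List.count z (scores.flatMap fun s => T.filter (fun t => f t == s))
        = if f z ∈ scores then List.count z T else 0 := by
  intro scores
  induction scores with
  | nil => intro _ z; simp
  | cons s rest ih =>
    intro hnd z
    rcases List.nodup_cons.mp hnd with ⟨hs, hrest⟩
    rw [List.flatMap_cons, List.count_append, pv_count_filter, ih hrest z]
    by_cases hz : f z = s
    · have e1 : (f z == s) = true := by simp [hz]
      have e2 : f z ∉ rest := by rw [hz]; exact hs
      have e3 : f z ∈ s :: rest := by simp [hz]
      simp [e1, e2, e3]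
    · have e1 : (f z == s) = false := by simp [hz]
      simp only [e1]
      by_cases h3 : f z ∈ rest
      · have e3 : f z ∈ s :: rest := List.mem_cons_of_mem _ h3
        simp [h3, e3]
      · have e3 : f z ∉ s :: rest := by simp [hz, h3]
        simp [h3, e3]

theorem pv_partition_perm {β : Type} [DecidableEq β] (T : List β) (f : β → Int)
    (scores : List Int) (hnd : scores.Nodup) (hmem : ∀ t ∈ T, f t ∈ scores) :
    (scores.flatMap fun s => T.filter (fun t => f t == s)).Perm T := by
  refine List.perm_iff_count.mpr ?_
  intro z
  rw [pv_flatMap_count T f scores hnd z]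
  by_cases hz : f z ∈ scores
  · simp [hz]
  · have : z ∉ T := fun h => hz (hmem z h)
    simp [hz, List.count_eq_zero.mpr this]

theorem pvFlatMap_perm_congr {β : Type} (f g : Int → List β) :
    ∀ scores : List Int, (∀ s ∈ scores, (f s).Perm (g s)) →
      (scores.flatMap f).Perm (scores.flatMap g) := by
  intro scores
  induction scores with
  | nil => intro _; simp
  | cons s rest ih =>
    intro h
    simp only [List.flatMap_cons]
    exact (h s (List.mem_cons_self ..)).append (ih (fun s' hs' => h s' (List.mem_cons_of_mem _ hs')))

theorem pvFlatMap_pairwise {β : Type} (R : β → β → Prop) (g : Int → List β) :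
    ∀ scores : List Int, scores.Pairwise (fun a c => c < a) →
      (∀ s ∈ scores, (g s).Pairwise R) →
      (∀ s ∈ scores, ∀ s' ∈ scores, s' < s → ∀ x ∈ g s, ∀ y ∈ g s', R x y) →
      (scores.flatMap g).Pairwise R := by
  intro scores
  induction scores with
  | nil => intro _ _ _; simp
  | cons s rest ih =>
    intro hpw hself hcross
    rcases List.pairwise_cons.mp hpw with ⟨hhead, htail⟩
    simp only [List.flatMap_cons]
    refine List.pairwise_append.mpr ⟨hself s (List.mem_cons_self ..), ?_, ?_⟩
    · exact ih htail (fun s' hs' => hself s' (List.mem_cons_of_mem _ hs'))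
        (fun a ha b hb => hcross a (List.mem_cons_of_mem _ ha) b (List.mem_cons_of_mem _ hb))
    · intro x hx y hy
      rcases List.mem_flatMap.mp hy with ⟨s', hs', hy'⟩
      exact hcross s (List.mem_cons_self ..) s' (List.mem_cons_of_mem _ hs')
        (hhead s' hs') x hx y hy'

def pvTb (S : List (Int × String)) (s : Int) : List (Nat × (Int × String)) :=
  (pvTag 0 S).filter (fun t => t.2.1 == s)

theorem pvBA_score_eq (p q : Int × String) (h : p.1 = q.1) :
    pvBA p q = decide (PySem.Str.len q.2 < PySem.Str.len p.2) := by
  simp [pvBA, h]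

theorem pvTb_score (S : List (Int × String)) (s : Int) :
    ∀ t ∈ pvTb S s, t.2.1 = s := by
  intro t ht
  have := List.of_mem_filter ht
  simpa using this

theorem pvTb_pairwise (S : List (Int × String)) (s : Int) :
    (pvTb S s).Pairwise (fun p q => p.1 < q.1) :=
  (pvTag_pairwise S 0).sublist List.filter_sublist

theorem pvSrtTb_score (S : List (Int × String)) (s : Int) :
    ∀ t ∈ pvSrt pvRb (pvTb S s), t.2.1 = s := by
  intro t ht
  exact pvTb_score S s t ((pvSrt_perm pvRb (pvTb S s)).mem_iff.mp ht)

theorem pvDesc_mem : ∀ (k : Nat) (s : Int), s ∈ pvDesc k ↔ 1 ≤ s ∧ s ≤ (k : Int) := by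
  intro k
  induction k with
  | zero => intro s; simp [pvDesc]; omega
  | succ m ih =>
    intro s
    simp only [pvDesc, List.mem_cons, ih]
    push_cast
    omega

theorem pvDesc_pairwise : ∀ k : Nat, (pvDesc k).Pairwise (fun a c => c < a) := by
  intro k
  induction k with
  | zero => exact List.Pairwise.nil
  | succ m ih =>
    refine List.pairwise_cons.mpr ⟨?_, ih⟩
    intro s hs
    have := (pvDesc_mem m s).mp hs
    omega

theorem pvDesc_nodup (k : Nat) : (pvDesc k).Nodup :=
  (pvDesc_pairwise k).imp (fun h => by omega)

-- A's reverse (score, len) sort is the insertion sort by pvBA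
theorem pvSorted2_eq (S : List (Int × String)) :
    PySem.List.sorted2 S (fun x => x.1) (fun x => PySem.Str.len x.2) true
      = S.foldl (fun acc x => PySem.List.insertBy pvBA x acc) [] := rfl

-- A's global sort, lifted to the tagged list with the total order pvRb
theorem pvA_tagged (S : List (Int × String)) :
    PySem.List.sorted2 S (fun x => x.1) (fun x => PySem.Str.len x.2) true
      = (pvSrt pvRb (pvTag 0 S)).map Prod.snd := by
  rw [pvSorted2_eq]
  have h1 := pvFoldl_insertBy_map Prod.snd pvBA (pvTag 0 S) []
  rw [pvTag_map_snd S 0] at h1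
  simp only [List.map_nil] at h1
  rw [← h1]
  have h2 : pvSrt (fun p q => pvBA p.2 q.2) (pvTag 0 S) = pvSrt pvRb (pvTag 0 S) := by
    unfold pvSrt
    refine pvFoldl_insertBy_congr_idx _ _ (pvTag 0 S) [] (pvTag_pairwise S 0) (by simp) ?_
    intro p q _ _ hlt
    exact (pvRb_eq_bA p q hlt).symm
  unfold pvSrt at h2
  rw [h2]
  rfl

-- a per-score stable length sort, lifted to the tagged bucket with the same total order pvRb
theorem pvBucket_eq (S : List (Int × String)) (s : Int) :
    PySem.List.sorted ((S.filter (fun p => p.1 == s)).map (fun p => p.2))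
        (fun f => PySem.Str.len f) true
      = ((pvSrt pvRb (pvTb S s)).map Prod.snd).map (fun p => p.2) := by
  rw [PySem.List.sorted_rev_eq_foldl_insertBy]
  have hf : S.filter (fun p => p.1 == s) = (pvTb S s).map Prod.snd := by
    conv_lhs => rw [← pvTag_map_snd S 0]
    rw [List.filter_map]
    rfl
  rw [hf, List.map_map, List.map_map]
  have h1 := pvFoldl_insertBy_map ((fun (p : Int × String) => p.2) ∘ Prod.snd)
    (fun a b => decide (PySem.Str.len b < PySem.Str.len a)) (pvTb S s) []
  simp only [List.map_nil] at h1
  rw [← h1]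
  have h2 : pvSrt (fun p q =>
        decide (PySem.Str.len (((fun (p : Int × String) => p.2) ∘ Prod.snd) q) <
          PySem.Str.len (((fun (p : Int × String) => p.2) ∘ Prod.snd) p)))
      (pvTb S s) = pvSrt pvRb (pvTb S s) := by
    unfold pvSrt
    refine pvFoldl_insertBy_congr_idx _ _ (pvTb S s) [] (pvTb_pairwise S s) (by simp) ?_
    intro p q hp hq hlt
    have hp' : p ∈ pvTb S s := by
      rcases hp with h | h
      · exact h
      · exact absurd h (by simp)
    have hq' : q ∈ pvTb S s := by
      rcases hq with h | h
      · exact h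
      · exact absurd h (by simp)
    rw [pvRb_eq_bA p q hlt,
      pvBA_score_eq p.2 q.2 (by rw [pvTb_score S s p hp', pvTb_score S s q hq'])]
    rfl
  unfold pvSrt at h2
  rw [h2]
  rfl

-- B's tier sweep is a flatMap over the descending score list
theorem pvTiers_flatMap (pairs : List (Int × String)) :
    ∀ (k : Nat) (acc : List String), tiers_py_alt pairs k acc
      = acc ++ (pvDesc k).flatMap (fun s =>
          PySem.List.sorted ((pairs.filter (fun p => p.1 == s)).map (fun p => p.2))
            (fun f => PySem.Str.len f) true) := by
  intro k
  induction k with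
  | zero => intro acc; simp [tiers_py_alt, pvDesc]
  | succ m ih =>
    intro acc
    simp [tiers_py_alt, pvDesc, List.flatMap_cons, ih, List.append_assoc]

theorem pv_map_flatMap {β γ : Type} (g : β → γ) (f : Int → List β) :
    ∀ xs : List Int, (xs.flatMap f).map g = xs.flatMap (fun s => (f s).map g) := by
  intro xs
  induction xs with
  | nil => rfl
  | cons s rest ih => simp [List.flatMap_cons, ih]

-- the tagged filtered global sort equals the tagged tier traversal
theorem pvTagged_pos_eq (S : List (Int × String)) (k : Nat)
    (hk : ∀ p ∈ S, p.1 ≤ (k : Int)) :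
    (pvSrt pvRb (pvTag 0 S)).filter (fun t => decide (0 < t.2.1))
      = (pvDesc k).flatMap (fun s => pvSrt pvRb (pvTb S s)) := by
  have perm1 : ((pvSrt pvRb (pvTag 0 S)).filter (fun t => decide (0 < t.2.1))).Perm
      ((pvTag 0 S).filter (fun t => decide (0 < t.2.1))) :=
    (pvSrt_perm pvRb (pvTag 0 S)).filter _
  have hbucket : ∀ s ∈ pvDesc k,
      pvTb S s = ((pvTag 0 S).filter (fun t => decide (0 < t.2.1))).filter
        (fun t => t.2.1 == s) := by
    intro s hs
    have hs1 := (pvDesc_mem k s).mp hs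
    unfold pvTb
    rw [List.filter_filter]
    refine (List.filter_congr ?_)
    intro t _
    by_cases h : t.2.1 = s
    · have h0 : (0:Int) < s := by omega
      simp [h, h0]
    · simp [h]
  have perm2 : ((pvDesc k).flatMap (fun s => pvSrt pvRb (pvTb S s))).Perm
      ((pvTag 0 S).filter (fun t => decide (0 < t.2.1))) := by
    have pa := pvFlatMap_perm_congr (fun s => pvSrt pvRb (pvTb S s)) (fun s => pvTb S s)
      (pvDesc k) (fun s _ => pvSrt_perm pvRb (pvTb S s))
    have pb : ((pvDesc k).flatMap (fun s => pvTb S s)).Perm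
        ((pvTag 0 S).filter (fun t => decide (0 < t.2.1))) := by
      have hmem : ∀ t ∈ (pvTag 0 S).filter (fun t => decide (0 < t.2.1)),
          t.2.1 ∈ pvDesc k := by
        intro t ht
        have h0 : (0:Int) < t.2.1 := by
          have := List.of_mem_filter ht
          simpa using this
        have hle : t.2.1 ≤ (k : Int) := hk t.2 (pvTag_mem_snd S 0 t (List.mem_of_mem_filter ht))
        exact (pvDesc_mem k t.2.1).mpr (by omega)
      have := pv_partition_perm ((pvTag 0 S).filter (fun t => decide (0 < t.2.1)))
        (fun t => t.2.1) (pvDesc k) (pvDesc_nodup k) hmem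
      refine List.Perm.trans ?_ this
      refine pvFlatMap_perm_congr _ _ (pvDesc k) ?_
      intro s hs
      exact (hbucket s hs) ▸ (List.Perm.refl _)
    exact pa.trans pb
  have pw1 : ((pvSrt pvRb (pvTag 0 S)).filter (fun t => decide (0 < t.2.1))).Pairwise
      (fun a c => pvRb a c = true) :=
    (pvSrt_pairwise_Rb _ (pvTag_pairwise S 0)).sublist List.filter_sublist
  have pw2 : ((pvDesc k).flatMap (fun s => pvSrt pvRb (pvTb S s))).Pairwise
      (fun a c => pvRb a c = true) := by
    refine pvFlatMap_pairwise _ _ (pvDesc k) (pvDesc_pairwise k) ?_ ?_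
    · intro s _; exact pvSrt_pairwise_Rb _ (pvTb_pairwise S s)
    · intro s _ s' _ hlt x hx y hy
      rw [pvRb_iff]
      left
      rw [pvSrtTb_score S s x hx, pvSrtTb_score S s' y hy]
      exact hlt
  exact pvEq_of_perm_of_pairwise pvRb pvRb_asym _ _ (perm1.trans perm2.symm) pw1 pw2

theorem pv_pred_eq (text : String) :
    (fun t => decide (t ≠ "" ∧ PySem.Str.isIn t text))
      = (fun t => !(t == "") && PySem.Str.isIn t text) := by
  funext t
  by_cases ht : t = "" <;> cases hi : PySem.Str.isIn t text <;> simp [ht]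

theorem pv_score_eq (text : String) (ft : List String) (htext : ¬ text = "") (hft : ¬ ft = []) :
    focus_score_text_py text ft = score_py_alt text ft := by
  unfold focus_score_text_py
  rw [if_neg (by tauto)]
  unfold term_overlap_py score_py_alt
  rw [PySem.List.foldl_ite_add_one]
  rw [pv_pred_eq]
  simp

-- B's accumulator loop builds A's map-then-filter raw list
theorem pv_raw_eq (facts : List String) :
    ∀ acc : List String,
      facts.foldl (fun acc item =>
          let text := PySem.Str.strip item
          if text == "" then acc else acc ++ [text]) acc
        = acc ++ (facts.map (fun item => PySem.Str.strip item)).filter (fun s => !(s == "")) := by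
  induction facts with
  | nil => intro acc; simp
  | cons x xs ih =>
    intro acc
    simp only [List.foldl_cons, List.map_cons, List.filter_cons]
    by_cases h : (PySem.Str.strip x == "") = true
    · rw [if_pos h, ih]
      simp [h]
    · rw [if_neg h, ih]
      simp [h]

-- the focused list A builds equals B's tier sweep (nonempty facts, terms present)
theorem pv_focused_final (raw ft : List String) (hft : ¬ ft = [])
    (hraw : ∀ f ∈ raw, ¬ f = "") :
    ((PySem.List.sorted2
        (raw.foldl (fun acc fact => acc ++ [(focus_score_text_py fact ft, fact)])
          ([] : List (Int × String)))
        (fun x => x.1) (fun x => PySem.Str.len x.2) true).filter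
        (fun p => decide (0 < p.1))).map (fun p => p.2)
      = tiers_py_alt (raw.map (fun f => (score_py_alt f ft, f))) ft.length [] := by
  have hsc : raw.foldl (fun acc fact => acc ++ [(focus_score_text_py fact ft, fact)])
      ([] : List (Int × String))
      = raw.map (fun fact => (score_py_alt fact ft, fact)) := by
    rw [PySem.List.foldl_append_singleton_eq_map
      (fun fact => (focus_score_text_py fact ft, fact)) raw []]
    rw [List.nil_append]
    refine List.map_congr_left ?_
    intro f hf
    rw [pv_score_eq f ft (hraw f hf) hft]
  rw [hsc]
  set S := raw.map (fun fact => (score_py_alt fact ft, fact)) with hS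
  have hk : ∀ p ∈ S, p.1 ≤ (ft.length : Int) := by
    intro p hp
    rcases List.mem_map.mp hp with ⟨f, _, rfl⟩
    show score_py_alt f ft ≤ (ft.length : Int)
    unfold score_py_alt
    exact_mod_cast List.countP_le_length ..
  rw [pvA_tagged, pvTiers_flatMap, List.nil_append]
  have hfilter : ((pvSrt pvRb (pvTag 0 S)).map Prod.snd).filter (fun p => decide (0 < p.1))
      = ((pvSrt pvRb (pvTag 0 S)).filter (fun t => decide (0 < t.2.1))).map Prod.snd := by
    rw [List.filter_map]
    rfl
  rw [hfilter, pvTagged_pos_eq S ft.length hk, pv_map_flatMap, pv_map_flatMap]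
  congr 1
  funext s
  rw [pvBucket_eq]

-- ===== VERDICT (by name: the statement is the Claim_ definition above) =====
theorem select_focus_facts_py_spec : Claim_equal_select_focus_facts_py := by
  unfold Claim_equal_select_focus_facts_py
  intro facts ft limit _
  unfold Spec_select_focus_facts_py select_focus_facts_py select_focus_facts_py_alt
  rw [pv_raw_eq facts [], List.nil_append]
  by_cases h1 : (facts.map (fun item => PySem.Str.strip item)).filter (fun s => !(s == "")) = []
  · simp [h1]
  · by_cases h2 : max limit 0 ≤ 0
    · have h2' : max limit 0 = 0 := by omega
      simp [h1, h2']
    · have h2' : ¬ max limit 0 = 0 := by omega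
      by_cases h3 : ft = []
      · simp [h1, h2, h2', h3]
      · simp only [h1, h2, h2', h3, or_self, if_neg, not_false_iff]
        rw [pv_focused_final _ ft h3 ?hr]
        case hr =>
          intro f hf
          have := List.of_mem_filter hf
          simpa using this
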